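-- pv_equiv track=rewrite | github.com/KHJun99/SSAFY | Solving_Club/0908_탐욕(부분집합,조합,그리디)/5203.베이비진 게임/5203.py | solve
-- ===== SOURCE A (Python) =====
-- def is_babygin(cnt):
--     # triple : 같은 숫자 3장
--     for k in range(10):
--         if cnt[k]  >= 3:
--             return True
--
--     # run : 연속된 숫자 3장
--     for k in range(8):      # 0~7까지만 확인하면 됨으로
--         if cnt[k] and cnt[k + 1] and cnt[k + 2]:        # 세 카드가 1이상이면 True 반환
--             return True
--     return False
--
-- def solve(cards):
--     c1 = [0] * 10
--     c2 = [0] * 10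
--
--     for i, x in enumerate(cards):
--         # 짝수 인덱스 : player1 차례
--         if i % 2 == 0:
--             c1[x] += 1
--             if is_babygin(c1):
--                 return 1
--
--         # 홀수 인덱스 : player2 차례
--         else:
--             c2[x] += 1
--             if is_babygin(c2):
--                 return 2
--     return 0        # 승부가 나지 않을 경우
-- ===== SOURCE B (Python) =====
-- def solve(cards):
--     # Deal alternates between the two players, so split it into the two
--     # independent streams, find the first turn at which each stream forms
--     # babygin, and compare dealing positions (P1's turn t is dealt before
--     # P2's turn t).
--     def first_win(stream):
--         cnt = [0] * 10
--         for t, v in enumerate(stream):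
--             cnt[v] += 1
--             # only patterns involving v can be new: a triple of v, or a
--             # run window containing v
--             if cnt[v] >= 3 or any(cnt[s] and cnt[s + 1] and cnt[s + 2]
--                                   for s in range(max(0, v - 2), min(v, 7) + 1)):
--                 return t
--         return None
--
--     t1 = first_win(cards[0::2])
--     t2 = first_win(cards[1::2])
--     if t1 is None and t2 is None:
--         return 0
--     if t2 is None:
--         return 1
--     if t1 is None:
--         return 2
--     return 1 if t1 <= t2 else 2
-- ===== Notes on version B (the rewrite author's own statement) =====
-- stated objective: alternative
-- what changed: B replaces A's single interleaved loop with two independent per-player stream scans (cards[0::2], cards[1::2]) that each return the first winning turn, combined by comparing dealing positions, and replaces A's full 10-bucket + 8-window babygin rescan after every card with a localized check of only the patterns through the card just added; Pre_ restricts to the problem's natural card domain 0-9, outside which A either raises IndexError or returns a value produced by accidental negative-index wraparound of its 10-slot count list.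
-- outside the precondition, e.g. on solve([-9, 0, -8, 0, -7]): A returns 1, B returns 0; on solve([12]): A raises IndexError, B raises IndexError
import Mathlib
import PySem

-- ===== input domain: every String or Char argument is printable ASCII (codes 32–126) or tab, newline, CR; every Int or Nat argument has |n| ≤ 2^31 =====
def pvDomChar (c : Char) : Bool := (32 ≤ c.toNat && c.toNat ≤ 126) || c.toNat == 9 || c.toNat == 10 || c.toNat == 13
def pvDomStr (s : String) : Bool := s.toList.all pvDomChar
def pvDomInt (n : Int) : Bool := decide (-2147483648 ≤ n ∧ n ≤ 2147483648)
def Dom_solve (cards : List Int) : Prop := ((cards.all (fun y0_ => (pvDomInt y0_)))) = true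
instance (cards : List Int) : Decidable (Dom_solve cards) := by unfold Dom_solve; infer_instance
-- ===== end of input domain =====

-- B replaces A's single interleaved loop by two independent per-player stream scans
-- combined by comparing first-winning turns, with a localized babygin check (alternative
-- decomposition, same asymptotic cost).

-- ===== PORT A =====
def isBabygin (cnt : List Int) : Bool :=
  ((PySem.List.pyRange 0 10 1).any fun k => decide (3 ≤ PySem.List.pyGetD cnt k 0)) ||
  ((PySem.List.pyRange 0 8 1).any fun k =>
    decide (PySem.List.pyGetD cnt k 0 ≠ 0) && decide (PySem.List.pyGetD cnt (k+1) 0 ≠ 0) &&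
    decide (PySem.List.pyGetD cnt (k+2) 0 ≠ 0))

def solveLoop : List Int → Nat → List Int → List Int → Int
  | [], _, _, _ => 0
  | x :: xs, i, c1, c2 =>
    if i % 2 = 0 then
      let c1' := PySem.List.pySetD c1 x (PySem.List.pyGetD c1 x 0 + 1)
      if isBabygin c1' then 1 else solveLoop xs (i+1) c1' c2
    else
      let c2' := PySem.List.pySetD c2 x (PySem.List.pyGetD c2 x 0 + 1)
      if isBabygin c2' then 2 else solveLoop xs (i+1) c1 c2'

def solve (cards : List Int) : Int :=
  solveLoop cards 0 (List.replicate 10 0) (List.replicate 10 0)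

-- ===== PORT B =====
-- localized check: only the triple of v or a run window containing v can be new
def winAtCard (cnt : List Int) (v : Int) : Bool :=
  decide (3 ≤ PySem.List.pyGetD cnt v 0) ||
  ((PySem.List.pyRange (max 0 (v-2)) (min v 7 + 1) 1).any fun s =>
    decide (PySem.List.pyGetD cnt s 0 ≠ 0) && decide (PySem.List.pyGetD cnt (s+1) 0 ≠ 0) &&
    decide (PySem.List.pyGetD cnt (s+2) 0 ≠ 0))

def firstWin : List Int → List Int → Nat → Option Nat
  | [], _, _ => none
  | x :: xs, cnt, t =>
    let cnt' := PySem.List.pySetD cnt x (PySem.List.pyGetD cnt x 0 + 1)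
    if winAtCard cnt' x then some t else firstWin xs cnt' (t+1)

def solve_alt (cards : List Int) : Int :=
  let p1 := (PySem.List.slice? cards (some 0) none 2).getD []
  let p2 := (PySem.List.slice? cards (some 1) none 2).getD []
  match firstWin p1 (List.replicate 10 0) 0, firstWin p2 (List.replicate 10 0) 0 with
  | none, none => 0
  | some _, none => 1
  | none, some _ => 2
  | some t1, some t2 => if t1 ≤ t2 then 1 else 2

-- ===== PRECONDITION & SPEC =====
-- Pre_ restricts to the problem's natural card domain 0–9: outside it Python's 10-slot
-- count list either raises IndexError (cards ≥ 10 or < -10) or, for cards in -10..-1,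
-- A returns a value produced by accidental negative-index wraparound.
def Pre_solve (cards : List Int) : Prop := ∀ x ∈ cards, 0 ≤ x ∧ x < 10
instance (cards : List Int) : Decidable (Pre_solve cards) := by unfold Pre_solve; infer_instance
def pvWitness_solve : List Int := ([3, 5, 3, 5, 3])

def Spec_solve (cards : List Int) (out : Int) : Prop := out = solve_alt cards
instance (cards : List Int) (out : Int) : Decidable (Spec_solve cards out) := by unfold Spec_solve; infer_instance

-- ===== CLAIM (what is proved, stated in full; the proofs are below) =====
def Claim_equal_solve : Prop := ∀ (cards : List Int), Dom_solve cards → Pre_solve cards → Spec_solve cards (solve cards)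

-- ===== LEMMAS AND PROOFS =====

def G (c : List Int) (k : Nat) : Int := c.getD k 0
def inc1 (c : List Int) (j : Nat) : List Int := c.set j (G c j + 1)
def Tri (c : List Int) : Prop := ∃ k, k < 10 ∧ 3 ≤ G c k
def Run (c : List Int) : Prop := ∃ s, s < 8 ∧ G c s ≠ 0 ∧ G c (s+1) ≠ 0 ∧ G c (s+2) ≠ 0
def Loc (c : List Int) (j : Nat) : Prop :=
  3 ≤ G c j ∨ ∃ s, s < 8 ∧ j ≤ s + 2 ∧ s ≤ j ∧ G c s ≠ 0 ∧ G c (s+1) ≠ 0 ∧ G c (s+2) ≠ 0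

def everyOther : List Int → List Int
  | [] => []
  | [x] => [x]
  | x :: _ :: r => x :: everyOther r

def combA : Option Nat → Option Nat → Int
  | none, none => 0
  | some _, none => 1
  | none, some _ => 2
  | some t1, some t2 => if t1 ≤ t2 then 1 else 2

def combB : Option Nat → Option Nat → Int
  | none, none => 0
  | some _, none => 2
  | none, some _ => 1
  | some t2, some t1 => if t2 ≤ t1 then 2 else 1

lemma getD_norm (c : List Int) (x : Int) (h1 : 0 ≤ x) :
    PySem.List.pyGetD c x 0 = G c x.toNat := by
  have hx : x = ((x.toNat : Nat) : Int) := by omega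
  rw [hx, PySem.List.pyGetD_natCast]
  simp only [G, Int.toNat_natCast]

lemma setD_norm (c : List Int) (x : Int) (h1 : 0 ≤ x) (v : Int) :
    PySem.List.pySetD c x v = c.set x.toNat v := by
  rw [PySem.List.pySetD_of_nonneg c v h1]

lemma G_set (c : List Int) (j k : Nat) (v : Int) (hj : j < c.length) :
    G (c.set j v) k = if k = j then v else G c k := by
  simp only [G, List.getD_eq_getElem?_getD, List.getElem?_set]
  rcases eq_or_ne j k with h | h
  · subst h; simp [hj]
  · simp [h, Ne.symm h]

lemma isBabygin_iff (c : List Int) : isBabygin c = true ↔ Tri c ∨ Run c := by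
  simp only [isBabygin, Bool.or_eq_true, List.any_eq_true, PySem.List.mem_pyRange_one,
    decide_eq_true_eq, Bool.and_eq_true]
  constructor
  · rintro (⟨k, ⟨hk0, hk10⟩, hk⟩ | ⟨k, ⟨hk0, hk8⟩, ⟨h0, h1⟩, h2⟩)
    · left
      refine ⟨k.toNat, by omega, ?_⟩
      rwa [show k = ((k.toNat : Nat) : Int) by omega, PySem.List.pyGetD_natCast] at hk
    · right
      refine ⟨k.toNat, by omega, ?_, ?_, ?_⟩
      · rwa [show k = ((k.toNat : Nat) : Int) by omega, PySem.List.pyGetD_natCast] at h0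
      · rwa [show k + 1 = ((k.toNat + 1 : Nat) : Int) by omega, PySem.List.pyGetD_natCast] at h1
      · rwa [show k + 2 = ((k.toNat + 2 : Nat) : Int) by omega, PySem.List.pyGetD_natCast] at h2
  · rintro (⟨k, hk10, hk⟩ | ⟨k, hk8, h0, h1, h2⟩)
    · exact Or.inl ⟨(k : Int), ⟨by omega, by omega⟩, by rwa [PySem.List.pyGetD_natCast]⟩
    · refine Or.inr ⟨(k : Int), ⟨by omega, by omega⟩, ⟨?_, ?_⟩, ?_⟩
      · rwa [PySem.List.pyGetD_natCast]
      · rwa [show ((k : Nat) : Int) + 1 = ((k + 1 : Nat) : Int) by omega, PySem.List.pyGetD_natCast]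
      · rwa [show ((k : Nat) : Int) + 2 = ((k + 2 : Nat) : Int) by omega, PySem.List.pyGetD_natCast]

lemma winAtCard_iff (c : List Int) (j : Nat) (hj : j < 10) :
    winAtCard c ((j : Nat) : Int) = true ↔ Loc c j := by
  simp only [winAtCard, Bool.or_eq_true, List.any_eq_true, PySem.List.mem_pyRange_one,
    decide_eq_true_eq, Bool.and_eq_true, Loc]
  constructor
  · rintro (h | ⟨s, ⟨hs1, hs2⟩, ⟨h0, h1⟩, h2⟩)
    · left; rwa [PySem.List.pyGetD_natCast] at h
    · right
      refine ⟨s.toNat, by omega, by omega, by omega, ?_, ?_, ?_⟩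
      · rwa [show s = ((s.toNat : Nat) : Int) by omega, PySem.List.pyGetD_natCast] at h0
      · rwa [show s + 1 = ((s.toNat + 1 : Nat) : Int) by omega, PySem.List.pyGetD_natCast] at h1
      · rwa [show s + 2 = ((s.toNat + 2 : Nat) : Int) by omega, PySem.List.pyGetD_natCast] at h2
  · rintro (h | ⟨s, hs8, hjs, hsj, h0, h1, h2⟩)
    · left; rwa [PySem.List.pyGetD_natCast]
    · refine Or.inr ⟨(s : Int), ⟨by omega, by omega⟩, ⟨?_, ?_⟩, ?_⟩
      · rwa [PySem.List.pyGetD_natCast]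
      · rwa [show ((s : Nat) : Int) + 1 = ((s + 1 : Nat) : Int) by omega, PySem.List.pyGetD_natCast]
      · rwa [show ((s : Nat) : Int) + 2 = ((s + 2 : Nat) : Int) by omega, PySem.List.pyGetD_natCast]

lemma local_full (c : List Int) (j : Nat) (hc : c.length = 10) (hj : j < 10)
    (hnw : ¬(Tri c ∨ Run c)) : (Tri (inc1 c j) ∨ Run (inc1 c j)) ↔ Loc (inc1 c j) j := by
  have hset : ∀ k, G (inc1 c j) k = if k = j then G c j + 1 else G c k := by
    intro k; exact G_set c j k _ (by omega)
  constructor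
  · rintro (⟨k, hk10, hk⟩ | ⟨s, hs8, h0, h1, h2⟩)
    · by_cases hkj : k = j
      · left; rwa [hkj] at hk
      · exfalso; exact hnw (Or.inl ⟨k, hk10, by rwa [hset k, if_neg hkj] at hk⟩)
    · by_cases hmem : s ≤ j ∧ j ≤ s + 2
      · exact Or.inr ⟨s, hs8, hmem.2, hmem.1, h0, h1, h2⟩
      · exfalso
        refine hnw (Or.inr ⟨s, hs8, ?_, ?_, ?_⟩)
        · rwa [hset s, if_neg (by omega)] at h0
        · rwa [hset (s+1), if_neg (by omega)] at h1
        · rwa [hset (s+2), if_neg (by omega)] at h2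
  · rintro (h | ⟨s, hs8, hjs, hsj, h0, h1, h2⟩)
    · exact Or.inl ⟨j, hj, h⟩
    · exact Or.inr ⟨s, hs8, h0, h1, h2⟩

lemma fw_shift (xs : List Int) : ∀ (c : List Int) (t : Nat),
    firstWin xs c t = (firstWin xs c 0).map (· + t) := by
  induction xs with
  | nil => intro c t; simp [firstWin]
  | cons x xs ih =>
    intro c t
    simp only [firstWin]
    split
    · simp
    · rw [ih _ (t+1), ih _ 1, Option.map_map]
      congr 1; funext r; simp; omega

lemma combA_some_zero (o : Option Nat) : combA (some 0) o = 1 := by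
  cases o <;> simp [combA]

lemma combB_some_zero (o : Option Nat) : combB (some 0) o = 2 := by
  cases o <;> simp [combB]

lemma combA_shift (o1 o2 : Option Nat) : combA (o1.map (· + 1)) o2 = combB o2 o1 := by
  cases o1 <;> cases o2 <;> simp [combA, combB] <;> omega

lemma combB_shift (o2 o1 : Option Nat) : combB (o2.map (· + 1)) o1 = combA o1 o2 := by
  cases o2 <;> cases o1 <;> simp [combA, combB] <;> omega

lemma everyOther_cons (x : Int) (xs : List Int) :
    everyOther (x :: xs) = x :: everyOther xs.tail := by
  cases xs <;> rfl

lemma loop_eq : ∀ xs : List Int, (∀ x ∈ xs, 0 ≤ x ∧ x < 10) →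
    ∀ c1 c2 : List Int, c1.length = 10 → c2.length = 10 →
    isBabygin c1 = false → isBabygin c2 = false → ∀ i : Nat,
    solveLoop xs i c1 c2 = if i % 2 = 0
      then combA (firstWin (everyOther xs) c1 0) (firstWin (everyOther xs.tail) c2 0)
      else combB (firstWin (everyOther xs) c2 0) (firstWin (everyOther xs.tail) c1 0) := by
  intro xs
  induction xs with
  | nil => intro _ c1 c2 _ _ _ _ i; simp [solveLoop, everyOther, firstWin, combA, combB]
  | cons x xs ih =>
    intro hr c1 c2 hc1 hc2 hb1 hb2 i
    have hx := hr x (by simp)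
    have hr' : ∀ y ∈ xs, 0 ≤ y ∧ y < 10 := fun y hy => hr y (by simp [hy])
    have hj : x.toNat < 10 := by omega
    have hxc : x = ((x.toNat : Nat) : Int) := by omega
    rw [everyOther_cons, List.tail_cons]
    by_cases hi : i % 2 = 0
    · rw [if_pos hi]
      have hc1' : PySem.List.pySetD c1 x (PySem.List.pyGetD c1 x 0 + 1) = inc1 c1 x.toNat := by
        rw [setD_norm c1 x hx.1, getD_norm c1 x hx.1]; rfl
      have hwin : winAtCard (inc1 c1 x.toNat) x = isBabygin (inc1 c1 x.toNat) := by
        rw [hxc, Bool.eq_iff_iff, winAtCard_iff _ _ hj, isBabygin_iff]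
        exact ((local_full c1 x.toNat hc1 hj (by rw [← isBabygin_iff, hb1]; simp)).symm)
      simp only [solveLoop, firstWin, hc1', hwin, if_pos hi]
      by_cases hw : isBabygin (inc1 c1 x.toNat) = true
      · rw [if_pos hw, if_pos hw, combA_some_zero]
      · rw [if_neg hw, if_neg hw]
        rw [fw_shift _ _ 1, combA_shift]
        rw [ih hr' (inc1 c1 x.toNat) c2 (by simp [inc1, hc1]) hc2
          (by simpa using hw) hb2 (i+1), if_neg (by omega)]
    · rw [if_neg hi]
      have hc2' : PySem.List.pySetD c2 x (PySem.List.pyGetD c2 x 0 + 1) = inc1 c2 x.toNat := by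
        rw [setD_norm c2 x hx.1, getD_norm c2 x hx.1]; rfl
      have hwin : winAtCard (inc1 c2 x.toNat) x = isBabygin (inc1 c2 x.toNat) := by
        rw [hxc, Bool.eq_iff_iff, winAtCard_iff _ _ hj, isBabygin_iff]
        exact ((local_full c2 x.toNat hc2 hj (by rw [← isBabygin_iff, hb2]; simp)).symm)
      simp only [solveLoop, firstWin, hc2', hwin, if_neg hi]
      by_cases hw : isBabygin (inc1 c2 x.toNat) = true
      · rw [if_pos hw, if_pos hw, combB_some_zero]
      · rw [if_neg hw, if_neg hw]
        rw [fw_shift _ _ 1, combB_shift]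
        rw [ih hr' c1 (inc1 c2 x.toNat) hc1 (by simp [inc1, hc2])
          hb1 (by simpa using hw) (i+1), if_pos (by omega)]

lemma eo_filterMap : ∀ xs : List Int,
    List.filterMap (fun k : Nat => xs[2*k]?) (List.range ((xs.length+1)/2)) = everyOther xs := by
  intro xs
  induction xs using everyOther.induct with
  | case1 => simp [everyOther]
  | case2 x => simp [everyOther]
  | case3 x y r ih =>
    have hlen : ((x :: y :: r).length + 1)/2 = (r.length+1)/2 + 1 := by simp; omega
    rw [hlen, List.range_succ_eq_map, List.filterMap_cons, everyOther]
    simp only [List.getElem?_cons_zero, Nat.mul_zero]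
    rw [List.filterMap_map]
    congr 1

lemma slice_evens (xs : List Int) :
    (PySem.List.slice? xs (some 0) none 2).getD [] = everyOther xs := by
  norm_num [PySem.List.slice?, PySem.List.sliceIndices]
  have hcount : (if 0 < xs.length then (((xs.length : Int) + 2 - 1) / 2).toNat else 0)
      = (xs.length+1)/2 := by
    split <;> omega
  simp only [show ∀ k : Nat, ((2 * (k:Int)).toNat) = 2*k from fun k => by omega]
  rw [hcount, eo_filterMap]

lemma slice_odds (xs : List Int) :
    (PySem.List.slice? xs (some 1) none 2).getD [] = everyOther xs.tail := by
  cases xs with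
  | nil => decide
  | cons x r =>
    norm_num [PySem.List.slice?, PySem.List.sliceIndices]
    have hcount : (if 0 < r.length then (((r.length : Int) + 2 - 1) / 2).toNat else 0)
        = (r.length+1)/2 := by
      split <;> omega
    simp only [show ∀ k : Nat, (((1:Int) + 2 * (k:Int)).toNat) = 2*k+1 from fun k => by omega]
    simp only [List.getElem?_cons_succ]
    rw [hcount, eo_filterMap]

lemma isBabygin_init : isBabygin (List.replicate 10 (0:Int)) = false := by decide

lemma solve_alt_eq (cards : List Int) :
    solve_alt cards = combA (firstWin (everyOther cards) (List.replicate 10 0) 0)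
      (firstWin (everyOther cards.tail) (List.replicate 10 0) 0) := by
  unfold solve_alt
  rw [slice_evens, slice_odds]
  rfl

-- ===== VERDICT (by name: the statement is the Claim_ definition above) =====
theorem solve_spec : Claim_equal_solve := by
  intro cards _ hpre
  unfold Spec_solve
  rw [solve_alt_eq]
  unfold solve
  rw [loop_eq cards hpre _ _ (by simp) (by simp) isBabygin_init isBabygin_init 0]
  simp
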